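-- pv_equiv track=rewrite | github.com/shhuan1989/algorithms | codeforces/552C.py | solve
-- ===== SOURCE A (Python) =====
-- def binval(m, w):
--     b = []
--     while m > 0:
--         b.append(m % w)
--         m //= w
--
--     return b
--
-- def solve(W, M):
--     b = binval(M, W)
--
--     if all([v <= 1 for v in b]):
--         return True
--
--     b += [0]
--     for i in range(len(b)-1):
--         v = b[i]
--         if v > 1:
--             v -= W
--             if v != 0 and v != -1:
--                 return False
--             b[i+1] += 1
--
--     return True
-- ===== SOURCE B (Python) =====
-- def solve(W, M):
--     m = M
--     carry = 0
--     while m > 0: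
--         d = m % W + carry
--         m //= W
--         if d <= 1:
--             carry = 0
--         elif d == W - 1 or d == W:
--             carry = 1
--         else:
--             return False
--     return True
-- ===== Notes on version B (the rewrite author's own statement) =====
-- stated objective: simpler
-- what changed: B fuses A's three phases (build the full base-W digit list, an all(<=1) scan, then an index loop mutating b[i+1]) into one streaming while loop over M that keeps only a scalar carry and no list.
import Mathlib
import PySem

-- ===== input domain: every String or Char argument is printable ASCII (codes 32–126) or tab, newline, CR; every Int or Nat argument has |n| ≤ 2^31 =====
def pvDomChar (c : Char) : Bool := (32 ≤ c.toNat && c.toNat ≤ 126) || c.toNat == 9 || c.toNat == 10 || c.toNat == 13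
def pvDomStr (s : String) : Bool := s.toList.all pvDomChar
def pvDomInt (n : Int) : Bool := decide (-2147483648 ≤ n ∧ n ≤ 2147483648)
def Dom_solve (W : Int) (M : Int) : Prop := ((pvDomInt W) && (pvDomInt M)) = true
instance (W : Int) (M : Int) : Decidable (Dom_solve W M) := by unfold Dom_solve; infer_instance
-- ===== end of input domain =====

-- B replaces A's digit-list construction + all() scan + mutating index loop by one streaming
-- while loop over M with a scalar carry (objective: simpler; return value only, no mutation involved).

-- ===== PORT A =====
-- while m > 0: b.append(m % w); m //= w   (fuel M.toNat+1 is enough whenever the Python loop terminates)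
def binval (fuel : Nat) (m w : Int) : List Int :=
  match fuel with
  | 0 => []
  | fuel + 1 =>
    if m > 0 then PySem.Int.mod m w :: binval fuel (PySem.Int.floordiv m w) w else []

-- for i in range(len(b)-1): …  — n counts the remaining iterations, i is the current index;
-- b[i] / b[i+1] are always in range there, so List.getD i 0 is exact for the Python b[i].
def solveLoop (W : Int) (b : List Int) (i : Nat) (n : Nat) : Bool :=
  match n with
  | 0 => true
  | n + 1 =>
    let v := b.getD i 0
    if v > 1 then
      let v := v - W
      if v ≠ 0 ∧ v ≠ -1 then false
      else solveLoop W (b.set (i + 1) (b.getD (i + 1) 0 + 1)) (i + 1) n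
    else solveLoop W b (i + 1) n

def solve (W : Int) (M : Int) : Bool :=
  let b := binval (M.toNat + 1) M W
  if b.all (fun v => decide (v ≤ 1)) then true
  else
    let b := b ++ [0]
    solveLoop W b 0 (b.length - 1)

-- ===== PORT B =====
-- while m > 0: d = m % W + carry; m //= W; …   (same fuel bound as A's loop)
def solveAltLoop (W : Int) (fuel : Nat) (m carry : Int) : Bool :=
  match fuel with
  | 0 => true
  | fuel + 1 =>
    if m > 0 then
      let d := PySem.Int.mod m W + carry
      let m' := PySem.Int.floordiv m W
      if d ≤ 1 then solveAltLoop W fuel m' 0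
      else if d = W - 1 ∨ d = W then solveAltLoop W fuel m' 1
      else false
    else true

def solve_alt (W : Int) (M : Int) : Bool := solveAltLoop W (M.toNat + 1) M 0

-- ===== PRECONDITION & SPEC =====
-- Pre_ excludes exactly the inputs where Python A does not return: W = 0 with M > 0 raises
-- ZeroDivisionError and W = 1 with M > 0 loops forever (B behaves the same way there).
def Pre_solve (W : Int) (M : Int) : Prop := (W ≠ 0 ∧ W ≠ 1) ∨ M ≤ 0
instance (W : Int) (M : Int) : Decidable (Pre_solve W M) := by unfold Pre_solve; infer_instance
def pvWitness_solve : Int × Int := (2, 7)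
def Spec_solve (W : Int) (M : Int) (out : Bool) : Prop := out = solve_alt W M
instance (W : Int) (M : Int) (out : Bool) : Decidable (Spec_solve W M out) := by unfold Spec_solve; infer_instance

-- ===== CLAIM (what is proved, stated in full; the proofs are below) =====
def Claim_equal_solve : Prop := ∀ (W : Int) (M : Int), Dom_solve W M → Pre_solve W M → Spec_solve W M (solve W M)

-- ===== LEMMAS AND PROOFS =====

-- the common carry-checker over an explicit digit list, shaped like A's branch structure
def checkC (W : Int) : List Int → Int → Bool
  | [], _ => true
  | d :: rest, c =>
    let v := d + c
    if v > 1 then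
      if v - W ≠ 0 ∧ v - W ≠ -1 then false else checkC W rest 1
    else checkC W rest 0

-- add the pending carry to the head digit (used only to state the loop invariant)
def headAdd (c : Int) : List Int → List Int
  | [] => []
  | d :: r => (d + c) :: r

-- B's streaming loop computes checkC over the digits binval produces (same fuel, same unrolling)
theorem solveAltLoop_eq_checkC (W : Int) (fuel : Nat) :
    ∀ (m c : Int), solveAltLoop W fuel m c = checkC W (binval fuel m W) c := by
  induction fuel with
  | zero => intro m c; simp [solveAltLoop, binval, checkC]
  | succ fuel ih =>
    intro m c
    simp only [solveAltLoop, binval]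
    by_cases hm : m > 0
    · simp only [if_pos hm]
      simp only [checkC]
      by_cases h1 : PySem.Int.mod m W + c ≤ 1
      · have hnot : ¬ (PySem.Int.mod m W + c > 1) := by omega
        simp [h1, hnot, ih]
      · have h1' : PySem.Int.mod m W + c > 1 := by omega
        by_cases h2 : PySem.Int.mod m W + c = W - 1 ∨ PySem.Int.mod m W + c = W
        · have hok : ¬ (PySem.Int.mod m W + c - W ≠ 0 ∧ PySem.Int.mod m W + c - W ≠ -1) := by omega
          simp [h1, h2, h1', hok, ih]
        · have hbad : PySem.Int.mod m W + c - W ≠ 0 ∧ PySem.Int.mod m W + c - W ≠ -1 := by omega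
          simp [h1, h2, h1', hbad]
    · simp [hm, checkC]

-- the index loop never looks left of i, so consing a cell while bumping i changes nothing
theorem solveLoop_shift (W a : Int) :
    ∀ (n : Nat) (l : List Int) (i : Nat), solveLoop W (a :: l) (i + 1) n = solveLoop W l i n := by
  intro n
  induction n with
  | zero => intro l i; simp [solveLoop]
  | succ n ih =>
    intro l i
    simp only [solveLoop, List.getD_cons_succ]
    split_ifs with hv hbad
    · rfl
    · rw [show (a :: l).set (i + 1 + 1) (l.getD (i + 1) 0 + 1)
          = a :: l.set (i + 1) (l.getD (i + 1) 0 + 1) from rfl]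
      exact ih _ (i + 1)
    · exact ih l (i + 1)

-- A's index loop over (digits with the carry folded into the head) ++ [z] equals checkC
theorem solveLoop_eq_checkC (W : Int) :
    ∀ (b : List Int) (c z : Int),
      solveLoop W (headAdd c b ++ [z]) 0 b.length = checkC W b c := by
  intro b
  induction b with
  | nil => intro c z; simp [headAdd, solveLoop, checkC]
  | cons d r ih =>
    intro c z
    simp only [headAdd, List.cons_append, List.length_cons]
    simp only [solveLoop, List.getD_cons_zero, checkC]
    by_cases hv : d + c > 1
    · by_cases hbad : d + c - W ≠ 0 ∧ d + c - W ≠ -1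
      · simp [hv, hbad]
      · -- carry 1 into the next cell
        simp only [if_pos hv, if_neg hbad]
        cases r with
        | nil =>
          simp [solveLoop, checkC]
        | cons e r' =>
          have hset : ((d + c) :: (e :: r' ++ [z])).set (0 + 1)
              (((d + c) :: (e :: r' ++ [z])).getD (0 + 1) 0 + 1)
              = (d + c) :: ((e + 1) :: r' ++ [z]) := by
            simp
          rw [hset, solveLoop_shift]
          have := ih 1 z
          simpa [headAdd] using this
    · -- v ≤ 1: no mutation, carry 0
      simp only [if_neg hv]
      rw [show (0 : Nat) + 1 = 0 + 1 from rfl, solveLoop_shift]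
      have := ih 0 z
      cases r with
      | nil => simpa [headAdd] using this
      | cons e r' => simpa [headAdd] using this

theorem checkC_all_le_one (W : Int) :
    ∀ (b : List Int), (∀ v ∈ b, v ≤ 1) → checkC W b 0 = true := by
  intro b
  induction b with
  | nil => intro _; simp [checkC]
  | cons d r ih =>
    intro h
    have hd : ¬ (1 < d) := by have := h d (by simp); omega
    simp [checkC, hd]
    exact ih (fun v hv => h v (by simp [hv]))

theorem solve_eq_checkC (W M : Int) : solve W M = checkC W (binval (M.toNat + 1) M W) 0 := by
  unfold solve
  set b := binval (M.toNat + 1) M W with hb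
  by_cases hall : b.all (fun v => decide (v ≤ 1))
  · simp only [hall, if_true]
    symm
    apply checkC_all_le_one
    intro v hv
    have := List.all_eq_true.mp hall v hv
    simpa using this
  · simp only [hall]
    cases hbe : b with
    | nil => simp [hbe] at hall
    | cons d r =>
      have := solveLoop_eq_checkC W (d :: r) 0 0
      simp only [headAdd, add_zero] at this
      simpa using this

-- ===== VERDICT (by name: the statement is the Claim_ definition above) =====
theorem solve_spec : Claim_equal_solve := by
  intro W M _ _
  unfold Spec_solve solve_alt
  rw [solve_eq_checkC, solveAltLoop_eq_checkC]
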